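-- pv_equiv track=rewrite | github.com/Patrick510/Python_IFMS_2 | Segundo semestre/TAREFA UVA 1/tarefa.py | palingrama
-- ===== SOURCE A (Python) =====
-- def palingrama(s):
--     freq = {}
--     for char in s:
--         if char in freq:
--             freq[char] += 1
--         else:
--             freq[char] = 1
--
--     odd_chars = [char for char, count in freq.items() if count % 2 != 0]
--     to_add = ''.join(sorted(odd_chars))
--
--     return to_add
-- ===== SOURCE B (Python) =====
-- def palingrama(s):
--     cs = sorted(s)
--     out = []
--     i = 0
--     n = len(cs)
--     while i < n:
--         j = i + 1
--         while j < n and cs[j] == cs[i]: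
--             j += 1
--         if (j - i) % 2 == 1:
--             out.append(cs[i])
--         i = j
--     return ''.join(out)
-- ===== Notes on version B (the rewrite author's own statement) =====
-- stated objective: alternative
-- what changed: Replaces the frequency-dict count-then-filter-then-sort pipeline with sort-first plus a run-length scan: the characters are sorted once and each maximal run of equal characters emits its character iff the run length is odd, so no dict is built and no separate sort of the result is needed.
import Mathlib
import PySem

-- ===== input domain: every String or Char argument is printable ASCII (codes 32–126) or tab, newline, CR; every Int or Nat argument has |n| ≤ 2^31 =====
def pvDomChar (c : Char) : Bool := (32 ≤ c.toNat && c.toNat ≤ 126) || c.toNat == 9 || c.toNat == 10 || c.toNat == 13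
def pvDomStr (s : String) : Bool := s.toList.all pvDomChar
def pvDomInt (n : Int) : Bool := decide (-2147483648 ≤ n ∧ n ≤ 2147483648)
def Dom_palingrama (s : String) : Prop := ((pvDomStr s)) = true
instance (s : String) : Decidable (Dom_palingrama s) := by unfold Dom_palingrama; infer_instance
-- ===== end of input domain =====

-- B replaces A's frequency-dict count-then-filter-then-sort with sort-first plus a run-length scan (alternative); same result.

-- ===== PORT A =====
-- counting loop: 'if char in freq: freq[char] += 1 else: freq[char] = 1'
def palingrama (s : String) : String :=
  let freq : PySem.Dict Char Int :=
    s.toList.foldl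
      (fun d c => if d.contains c then d.insert c (d.getD c 0 + 1) else d.insert c 1)
      PySem.Dict.empty
  let odd_chars : List Char :=
    (freq.items.filter (fun p => PySem.Int.mod p.2 2 != 0)).map (·.1)
  -- ''.join(sorted(odd_chars)) over single-character strings = the string of the sorted chars
  String.ofList (PySem.List.sorted odd_chars (fun c => c) false)

-- ===== PORT B =====
-- the outer while loop over the sorted characters: each step consumes one maximal run
-- (the inner 'while cs[j] == cs[i]' = takeWhile/dropWhile on the tail) and emits the
-- character iff the run length (j - i) is odd
def pvOddRuns : List Char → List Char
  | [] => []
  | c :: rest =>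
    let same := rest.takeWhile (· == c)
    let rest' := rest.dropWhile (· == c)
    if (1 + same.length) % 2 = 1 then c :: pvOddRuns rest' else pvOddRuns rest'
termination_by l => l.length
decreasing_by
  all_goals simpa using Nat.lt_succ_of_le (List.length_dropWhile_le _ rest)

-- 'cs = sorted(s)' then the run scan, then ''.join(out)
def palingrama_alt (s : String) : String :=
  let cs := PySem.List.sorted s.toList (fun c => c) false
  String.ofList (pvOddRuns cs)

-- ===== PRECONDITION & SPEC =====
def Spec_palingrama (s : String) (out : String) : Prop := out = palingrama_alt s
instance (s : String) (out : String) : Decidable (Spec_palingrama s out) := by unfold Spec_palingrama; infer_instance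

-- ===== CLAIM (what is proved, stated in full; the proofs are below) =====
def Claim_equal_palingrama : Prop := ∀ (s : String), Dom_palingrama s → Spec_palingrama s (palingrama s)

-- ===== LEMMAS AND PROOFS =====

-- A's counting loop is Counter(s)
theorem pv_freq_eq_counter (l : List Char) :
    l.foldl (fun d c => if d.contains c then d.insert c (d.getD c 0 + 1) else d.insert c 1)
      PySem.Dict.empty = PySem.Dict.counter l := by
  have h1 : l.foldl
      (fun (d : PySem.Dict Char Int) c => if d.contains c then d.insert c (d.getD c 0 + 1) else d.insert c 1)
      PySem.Dict.empty
    = l.foldl (fun (d : PySem.Dict Char Int) c => d.insert c (d.getD c 0 + 1)) PySem.Dict.empty := by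
    apply PySem.List.foldl_congr_mem
    intro d c _
    by_cases h : d.contains c
    · simp [h]
    · rw [if_neg h, PySem.Dict.getD_of_not_contains d 0 (by simpa using h)]
      norm_num
  rw [h1]
  exact PySem.Dict.foldl_insert_getD_add_one_eq_counter l

-- A's odd-count key list, read off Counter's items
theorem pv_odd_chars_eq (l : List Char) :
    (((PySem.Dict.counter l).items.filter (fun p => PySem.Int.mod p.2 2 != 0)).map (·.1))
      = (PySem.Set.ofList l).filter (fun c => ((l.count c : Int) % 2 != 0)) := by
  simp [PySem.Dict.items_counter, List.filter_map, List.map_map, Function.comp_def]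

-- head of dropWhile fails the predicate
theorem pv_dropWhile_head_not (p : Char → Bool) : ∀ (l : List Char) (h : Char) (t : List Char),
    l.dropWhile p = h :: t → p h = false
  | [], h, t => by simp [List.dropWhile]
  | a :: l, h, t => by
    simp only [List.dropWhile]
    by_cases hp : p a
    · simp only [hp]; exact pv_dropWhile_head_not p l h t
    · simp only [hp]; intro he
      cases he; simpa using hp

-- in a nondecreasing list c :: rest, the dropped tail after the head run contains no c,
-- and every element of it is strictly above c
theorem pv_run_split (c : Char) (rest : List Char)
    (h : (c :: rest).Pairwise (· ≤ ·)) :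
    (∀ x ∈ rest.dropWhile (· == c), c < x) ∧
    (rest.dropWhile (· == c)).Pairwise (· ≤ ·) := by
  have hrest : rest.Pairwise (· ≤ ·) := h.of_cons
  have hsub : (rest.dropWhile (· == c)).Sublist rest := List.dropWhile_sublist _
  have hp : (rest.dropWhile (· == c)).Pairwise (· ≤ ·) := hrest.sublist hsub
  refine ⟨?_, hp⟩
  cases hd : rest.dropWhile (· == c) with
  | nil => intro x hx; simp at hx
  | cons h' t' =>
    have hne : (h' == c) = false := pv_dropWhile_head_not _ rest h' t' hd
    have hle : c ≤ h' := by
      have : h' ∈ rest := hsub.mem (by rw [hd]; exact List.mem_cons_self)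
      exact List.rel_of_pairwise_cons h this
    have hlt : c < h' := lt_of_le_of_ne hle (Ne.symm (ne_of_beq_false hne))
    intro x hx
    rcases List.mem_cons.mp hx with rfl | hx'
    · exact hlt
    · have : h' ≤ x := by rw [hd] at hp; exact List.rel_of_pairwise_cons hp hx'
      exact lt_of_lt_of_le hlt this

-- unfolding equation for the run scan
theorem pv_oddRuns_cons (c : Char) (rest : List Char) :
    pvOddRuns (c :: rest) =
      if (1 + (rest.takeWhile (· == c)).length) % 2 = 1
      then c :: pvOddRuns (rest.dropWhile (· == c))
      else pvOddRuns (rest.dropWhile (· == c)) := by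
  rw [pvOddRuns]

-- membership in the run scan of a nondecreasing list = odd count
theorem pv_mem_oddRuns : ∀ (l : List Char), l.Pairwise (· ≤ ·) → ∀ (x : Char),
    (x ∈ pvOddRuns l ↔ l.count x % 2 = 1)
  | [], _, x => by simp [pvOddRuns]
  | c :: rest, h, x => by
    obtain ⟨hnot, hp⟩ := pv_run_split c rest h
    have ih := pv_mem_oddRuns (rest.dropWhile (· == c)) hp
    have hsplit : rest = rest.takeWhile (· == c) ++ rest.dropWhile (· == c) :=
      (List.takeWhile_append_dropWhile).symm
    have htake : ∀ y ∈ rest.takeWhile (· == c), y = c := by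
      intro y hy
      simpa using List.mem_takeWhile_imp hy
    have hcount_c : (c :: rest).count c = 1 + (rest.takeWhile (· == c)).length := by
      rw [List.count_cons_self]
      conv_lhs => rw [hsplit]
      rw [List.count_append]
      have h1 : (rest.takeWhile (· == c)).count c = (rest.takeWhile (· == c)).length := by
        apply List.count_eq_length.mpr
        intro y hy; exact ((htake y hy).symm)
      have h2 : (rest.dropWhile (· == c)).count c = 0 := by
        apply List.count_eq_zero.mpr
        intro hc; exact absurd rfl (ne_of_gt (hnot c hc))
      omega
    by_cases hx : x = c
    · subst hx
      have hnm : x ∉ pvOddRuns (rest.dropWhile (· == x)) := by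
        intro hm
        have h1 : (rest.dropWhile (· == x)).count x % 2 = 1 := (ih x).mp hm
        have h2 : x ∈ rest.dropWhile (· == x) := List.count_pos_iff.mp (by omega)
        exact absurd rfl (ne_of_gt (hnot x h2))
      rw [pv_oddRuns_cons, hcount_c]
      split_ifs with hpar
      · simp [hnm, hpar]
      · simp [hnm]; omega
    · have hcount_x : (c :: rest).count x = (rest.dropWhile (· == c)).count x := by
        rw [List.count_cons_of_ne (Ne.symm hx)]
        conv_lhs => rw [hsplit]
        rw [List.count_append]
        have : (rest.takeWhile (· == c)).count x = 0 := by
          apply List.count_eq_zero.mpr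
          intro hc; exact hx (htake x hc)
        omega
      rw [pv_oddRuns_cons, hcount_x]
      split_ifs with hpar
      · simp [List.mem_cons, hx, ih]
      · simp [ih]
termination_by l => l.length
decreasing_by simpa using Nat.lt_succ_of_le (List.length_dropWhile_le _ rest)

-- the run scan of a nondecreasing list is strictly increasing
theorem pv_oddRuns_pairwise_lt : ∀ (l : List Char), l.Pairwise (· ≤ ·) →
    (pvOddRuns l).Pairwise (· < ·)
  | [], _ => by simp [pvOddRuns]
  | c :: rest, h => by
    obtain ⟨hnot, hp⟩ := pv_run_split c rest h
    have ih := pv_oddRuns_pairwise_lt (rest.dropWhile (· == c)) hp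
    rw [pv_oddRuns_cons]
    split_ifs with hpar
    · refine List.Pairwise.cons ?_ ih
      intro y hy
      have h1 : (rest.dropWhile (· == c)).count y % 2 = 1 :=
        (pv_mem_oddRuns _ hp y).mp hy
      exact hnot y (List.count_pos_iff.mp (by omega))
    · exact ih
termination_by l => l.length
decreasing_by simpa using Nat.lt_succ_of_le (List.length_dropWhile_le _ rest)

-- the sorted-run-scan list is a permutation of A's odd-character list
theorem pv_perm (l : List Char) :
    (pvOddRuns (PySem.List.sorted l (fun c => c) false)).Perm
      ((PySem.Set.ofList l).filter (fun c => ((l.count c : Int) % 2 != 0))) := by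
  have hsorted : (PySem.List.sorted l (fun c => c) false).Pairwise (· ≤ ·) := by
    simpa using PySem.List.sorted_pairwise l (fun c => c)
  have hperm : (PySem.List.sorted l (fun c => c) false).Perm l :=
    PySem.List.sorted_perm l (fun c => c) false
  have hnodup1 : (pvOddRuns (PySem.List.sorted l (fun c => c) false)).Nodup :=
    (pv_oddRuns_pairwise_lt _ hsorted).imp (fun h => ne_of_lt h)
  have hnodup2 : ((PySem.Set.ofList l).filter (fun c => ((l.count c : Int) % 2 != 0))).Nodup :=
    (PySem.Set.nodup_ofList l).filter _
  rw [List.perm_ext_iff_of_nodup hnodup1 hnodup2]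
  intro x
  rw [pv_mem_oddRuns _ hsorted, List.mem_filter, PySem.Set.mem_ofList, hperm.count_eq]
  constructor
  · intro hodd
    refine ⟨List.count_pos_iff.mp (by omega), ?_⟩
    simp only [bne_iff_ne, ne_eq]
    omega
  · intro ⟨_, hb⟩
    simp only [bne_iff_ne, ne_eq] at hb
    omega

-- ===== VERDICT (by name: the statement is the Claim_ definition above) =====
theorem palingrama_spec : Claim_equal_palingrama := by
  intro s _
  unfold Spec_palingrama palingrama palingrama_alt
  simp only [pv_freq_eq_counter, pv_odd_chars_eq]
  congr 1
  have hsorted : (PySem.List.sorted s.toList (fun c => c) false).Pairwise (· ≤ ·) := by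
    simpa using PySem.List.sorted_pairwise s.toList (fun c => c)
  exact PySem.List.sorted_eq_of_perm_of_pairwise_lt _ _ _
    (pv_perm s.toList) (by simpa using pv_oddRuns_pairwise_lt _ hsorted)
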